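-- pv_equiv track=rewrite | github.com/dev-logic12/Problem-Solving | 프로그래머스/0/181837. 커피 심부름/커피 심부름.py | solution
-- ===== SOURCE A (Python) =====
-- def solution(order):
--     # 가격 맵을 만들어서 각 메뉴에 맞는 가격을 설정
--     price_map = {
--         'latte': 500,  # latte에는 500원 추가
--         'basic': 4500,  # 기본 가격 4500원
--     }
--
--     answer = 0
--     for want in order:
--         if 'latte' in want:
--             answer += price_map['latte'] + price_map['basic']  # latte는 추가금액이 있기 때문에 기본 가격에 더해줌
--         else:
--             answer += price_map['basic']  # latte가 아니면 기본 가격만 더함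
--     return answer
-- ===== SOURCE B (Python) =====
-- def solution(order):
--     lattes = sum(1 for want in order if 'latte' in want)
--     total = sum(1 for want in order)
--     return 4500 * total + 500 * lattes
-- ===== Notes on version B (the rewrite author's own statement) =====
-- stated objective: simpler
-- what changed: Replaces the per-item conditional accumulation over a price dict with two aggregate counts (total items and latte items) combined by the closed formula 4500*total + 500*lattes.
import Mathlib
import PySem

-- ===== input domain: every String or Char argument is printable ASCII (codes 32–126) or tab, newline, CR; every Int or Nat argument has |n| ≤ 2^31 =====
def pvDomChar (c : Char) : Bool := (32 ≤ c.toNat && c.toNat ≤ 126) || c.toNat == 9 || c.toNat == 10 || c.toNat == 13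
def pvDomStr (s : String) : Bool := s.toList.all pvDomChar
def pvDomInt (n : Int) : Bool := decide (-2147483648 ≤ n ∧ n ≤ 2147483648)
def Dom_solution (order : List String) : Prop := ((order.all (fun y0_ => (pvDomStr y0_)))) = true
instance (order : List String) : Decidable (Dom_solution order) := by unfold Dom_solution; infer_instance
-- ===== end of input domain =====

-- B replaces A's per-item conditional accumulation with two counts and a closed formula (objective: simpler).

-- ===== PORT A =====
def solution (order : List String) : Int :=
  let price_map : PySem.Dict String Int :=
    (PySem.Dict.empty.insert "latte" 500).insert "basic" 4500
  order.foldl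
    (fun answer want =>
      if PySem.Str.isIn "latte" want then
        answer + (price_map.getD "latte" 0 + price_map.getD "basic" 0)
      else
        answer + price_map.getD "basic" 0)
    0

-- ===== PORT B =====
def solution_alt (order : List String) : Int :=
  let lattes : Int := (order.countP (fun want => PySem.Str.isIn "latte" want) : Nat)
  let total : Int := (order.length : Nat)
  4500 * total + 500 * lattes

-- ===== PRECONDITION & SPEC =====
def Spec_solution (order : List String) (out : Int) : Prop := out = solution_alt order
instance (order : List String) (out : Int) : Decidable (Spec_solution order out) := by unfold Spec_solution; infer_instance

-- ===== CLAIM (what is proved, stated in full; the proofs are below) =====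
def Claim_equal_solution : Prop := ∀ (order : List String), Dom_solution order → Spec_solution order (solution order)

-- ===== LEMMAS AND PROOFS =====
theorem solution_foldl_aux (ws : List String) : ∀ (a : Int),
    ws.foldl
      (fun answer want =>
        if PySem.Str.isIn "latte" want then answer + (500 + 4500) else answer + 4500) a
    = a + 4500 * (ws.length : Int)
        + 500 * ((ws.countP (fun want => PySem.Str.isIn "latte" want) : Nat) : Int) := by
  induction ws with
  | nil => intro a; simp
  | cons w ws ih =>
    intro a
    simp only [List.foldl_cons, List.countP_cons, List.length_cons]
    rw [ih]
    by_cases h : PySem.Str.isIn "latte" w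
    · simp only [h, if_true]; push_cast; ring
    · simp only [h, if_false, Bool.false_eq_true]; push_cast; ring

theorem solution_eq_alt (order : List String) : solution order = solution_alt order := by
  show order.foldl
      (fun answer want =>
        if PySem.Str.isIn "latte" want then answer + (500 + 4500) else answer + 4500) 0
    = solution_alt order
  rw [solution_foldl_aux]
  unfold solution_alt
  push_cast
  ring

-- ===== VERDICT (by name: the statement is the Claim_ definition above) =====
theorem solution_spec : Claim_equal_solution := by
  intro order _
  exact solution_eq_alt order
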